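-- pv_equiv track=rewrite | github.com/Nondegon/Kaalendar-Ai | calendarAlgo.py | fit_perm
-- ===== SOURCE A (Python) =====
-- def fit_perm(to_fit, taken_intervals, left_bound, right_bound):
--     """Try to fit the intervals to_fit into the open spaces defined by taken_intervals."""
--     open_intervals = []
--     left = left_bound
--
--     for l, r in taken_intervals:
--         if left > right_bound:
--             break
--         if left < l:
--             open_intervals.append([left, l - 1])
--         left = r + 1
--
--     if left <= right_bound:
--         open_intervals.append([left, right_bound])
--
--     res = []
--     idx = 0
--     for f in to_fit:
--         while idx < len(open_intervals) and open_intervals[idx][1] - open_intervals[idx][0] + 1 < f: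
--             idx += 1
--         if idx < len(open_intervals):
--             res.append((open_intervals[idx][0], open_intervals[idx][0] + f - 1))
--             open_intervals[idx][0] += f  # shorten the open interval
--         else:
--             return []
--
--     return res
-- ===== SOURCE B (Python) =====
-- def fit_perm(to_fit, taken_intervals, left_bound, right_bound):
--     """Fused single pass: pull open gaps on demand instead of materializing open_intervals."""
--     res = []
--     cur = None            # current open gap (start, end), already shrunk by earlier fits
--     i = 0                 # next taken interval to inspect
--     left = left_bound     # left edge of the not-yet-scanned region
--     n = len(taken_intervals)
--     for f in to_fit:
--         if cur is not None and cur[1] - cur[0] + 1 >= f: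
--             start, end = cur
--         else:
--             found = None
--             while i < n:
--                 if left > right_bound:
--                     break
--                 l, r = taken_intervals[i]
--                 i += 1
--                 if left < l and l - left >= f:
--                     found = (left, l - 1)
--                     left = r + 1
--                     break
--                 left = r + 1
--             if found is None:
--                 if i >= n and left <= right_bound and right_bound - left + 1 >= f:
--                     found = (left, right_bound)
--                     left = right_bound + 1
--                 else:
--                     return []
--             start, end = found
--         res.append((start, start + f - 1))
--         cur = (start + f, end)
--     return res
-- ===== Notes on version B (the rewrite author's own statement) =====
-- stated objective: alternative
-- what changed: B fuses A's two passes into one: it never materializes the open_intervals list, instead keeping a pointer into taken_intervals plus a running left edge and pulling (and shrinking) open gaps lazily on demand while placing each requested length.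
import Mathlib
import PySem

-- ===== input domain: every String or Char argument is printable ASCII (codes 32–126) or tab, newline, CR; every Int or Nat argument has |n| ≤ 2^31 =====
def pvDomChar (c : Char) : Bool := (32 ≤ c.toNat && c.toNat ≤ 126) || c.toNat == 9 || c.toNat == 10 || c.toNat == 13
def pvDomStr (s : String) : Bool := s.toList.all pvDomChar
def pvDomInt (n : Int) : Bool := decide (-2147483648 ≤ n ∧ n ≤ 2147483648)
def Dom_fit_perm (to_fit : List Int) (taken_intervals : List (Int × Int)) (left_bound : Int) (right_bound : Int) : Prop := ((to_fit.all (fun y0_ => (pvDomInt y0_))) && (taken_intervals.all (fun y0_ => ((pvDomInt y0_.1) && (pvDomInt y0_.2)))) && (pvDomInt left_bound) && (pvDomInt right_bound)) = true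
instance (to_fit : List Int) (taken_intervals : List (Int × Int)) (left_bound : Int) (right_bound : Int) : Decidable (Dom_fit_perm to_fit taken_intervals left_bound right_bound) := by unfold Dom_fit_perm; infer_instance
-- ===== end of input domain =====

-- B fuses A's two passes into one lazy pass (gaps pulled on demand, no open_intervals list); objective: alternative.

-- ===== PORT A =====
-- first loop of A: build open_intervals (break when left > right_bound; post-loop tail gap)
def pvBuildGapsA : List (Int × Int) → Int → Int → List (Int × Int) → List (Int × Int)
  | [], left, rb, acc => if left ≤ rb then acc ++ [(left, rb)] else acc
  | (l, r) :: rest, left, rb, acc =>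
    if left > rb then acc   -- break; post-loop `if left <= right_bound` is false here
    else pvBuildGapsA rest (r + 1) rb (if left < l then acc ++ [(left, l - 1)] else acc)

-- the `while idx < len(open_intervals) and cap < f: idx += 1` loop of A
def pvSkipIdxA (gaps : List (Int × Int)) (f : Int) (idx : Nat) : Nat :=
  if h : idx < gaps.length then
    if gaps[idx].2 - gaps[idx].1 + 1 < f then pvSkipIdxA gaps f (idx + 1) else idx
  else idx
termination_by gaps.length - idx

-- second loop of A over to_fit, mutating open_intervals[idx][0] in place (List.set)
def pvFitLoopA : List Int → List (Int × Int) → Nat → List (Int × Int) → List (Int × Int)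
  | [], _, _, res => res
  | f :: fs, gaps, idx, res =>
    let idx' := pvSkipIdxA gaps f idx
    if h : idx' < gaps.length then
      let g := gaps[idx']
      pvFitLoopA fs (gaps.set idx' (g.1 + f, g.2)) idx' (res ++ [(g.1, g.1 + f - 1)])
    else []

def fit_perm (to_fit : List Int) (taken_intervals : List (Int × Int)) (left_bound : Int) (right_bound : Int) : List (Int × Int) :=
  pvFitLoopA to_fit (pvBuildGapsA taken_intervals left_bound right_bound []) 0 []

-- ===== PORT B =====
-- pull taken intervals until an open gap of capacity ≥ f appears (B's inner while + tail check)
def pvSkipGapsB (f : Int) : List (Int × Int) → Int → Int → Option ((Int × Int) × List (Int × Int) × Int)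
  | [], left, rb =>
    if left ≤ rb ∧ rb - left + 1 ≥ f then some ((left, rb), [], rb + 1) else none
  | (l, r) :: rest, left, rb =>
    if left > rb then none
    else if left < l ∧ l - left ≥ f then some ((left, l - 1), rest, r + 1)
    else pvSkipGapsB f rest (r + 1) rb

-- B's main loop: state = current gap `cur`, unscanned taken suffix, running left edge
def pvFitLoopB : List Int → Option (Int × Int) → List (Int × Int) → Int → Int → List (Int × Int) → List (Int × Int)
  | [], _, _, _, _, res => res
  | f :: fs, cur, taken, left, rb, res =>
    match cur with
    | some g =>
      if g.2 - g.1 + 1 ≥ f then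
        pvFitLoopB fs (some (g.1 + f, g.2)) taken left rb (res ++ [(g.1, g.1 + f - 1)])
      else
        match pvSkipGapsB f taken left rb with
        | some (g', taken', left') =>
            pvFitLoopB fs (some (g'.1 + f, g'.2)) taken' left' rb (res ++ [(g'.1, g'.1 + f - 1)])
        | none => []
    | none =>
      match pvSkipGapsB f taken left rb with
      | some (g', taken', left') =>
          pvFitLoopB fs (some (g'.1 + f, g'.2)) taken' left' rb (res ++ [(g'.1, g'.1 + f - 1)])
      | none => []

def fit_perm_alt (to_fit : List Int) (taken_intervals : List (Int × Int)) (left_bound : Int) (right_bound : Int) : List (Int × Int) :=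
  pvFitLoopB to_fit none taken_intervals left_bound right_bound []

-- ===== PRECONDITION & SPEC =====
def Spec_fit_perm (to_fit : List Int) (taken_intervals : List (Int × Int)) (left_bound : Int) (right_bound : Int) (out : List (Int × Int)) : Prop := out = fit_perm_alt to_fit taken_intervals left_bound right_bound
instance (to_fit : List Int) (taken_intervals : List (Int × Int)) (left_bound : Int) (right_bound : Int) (out : List (Int × Int)) : Decidable (Spec_fit_perm to_fit taken_intervals left_bound right_bound out) := by unfold Spec_fit_perm; infer_instance

-- ===== CLAIM (what is proved, stated in full; the proofs are below) =====
def Claim_equal_fit_perm : Prop := ∀ (to_fit : List Int) (taken_intervals : List (Int × Int)) (left_bound : Int) (right_bound : Int), Dom_fit_perm to_fit taken_intervals left_bound right_bound → Spec_fit_perm to_fit taken_intervals left_bound right_bound (fit_perm to_fit taken_intervals left_bound right_bound)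

-- ===== LEMMAS AND PROOFS =====

-- pure (non-accumulator) form of A's gap list
def pvGapsOf : List (Int × Int) → Int → Int → List (Int × Int)
  | [], left, rb => if left ≤ rb then [(left, rb)] else []
  | (l, r) :: rest, left, rb =>
    if left > rb then []
    else (if left < l then [(left, l - 1)] else []) ++ pvGapsOf rest (r + 1) rb

theorem pvBuildGapsA_eq (taken : List (Int × Int)) (left rb : Int) (acc : List (Int × Int)) :
    pvBuildGapsA taken left rb acc = acc ++ pvGapsOf taken left rb := by
  induction taken generalizing left acc with
  | nil => simp [pvBuildGapsA, pvGapsOf]; split <;> simp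
  | cons hd tl ih =>
    obtain ⟨l, r⟩ := hd
    simp only [pvBuildGapsA, pvGapsOf]
    split
    · simp
    · rw [ih]; split <;> simp

-- suffix form of A's fitting loop
def pvSkipSmall (f : Int) : List (Int × Int) → List (Int × Int)
  | [] => []
  | g :: gs => if g.2 - g.1 + 1 < f then pvSkipSmall f gs else g :: gs

def pvFitLoopA' : List Int → List (Int × Int) → List (Int × Int) → List (Int × Int)
  | [], _, res => res
  | f :: fs, gaps, res =>
    match pvSkipSmall f gaps with
    | [] => []
    | g :: gs => pvFitLoopA' fs ((g.1 + f, g.2) :: gs) (res ++ [(g.1, g.1 + f - 1)])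

theorem pvSkipIdxA_drop (gaps : List (Int × Int)) (f : Int) (idx : Nat) :
    gaps.drop (pvSkipIdxA gaps f idx) = pvSkipSmall f (gaps.drop idx) := by
  fun_induction pvSkipIdxA gaps f idx with
  | case1 idx h hlt ih =>
      rw [ih, List.drop_eq_getElem_cons h, pvSkipSmall, if_pos hlt]
  | case2 idx h hlt =>
      rw [List.drop_eq_getElem_cons h, pvSkipSmall, if_neg hlt,
        ← List.drop_eq_getElem_cons h]
  | case3 idx h =>
      rw [List.drop_of_length_le (by omega), pvSkipSmall]

theorem pvDrop_set_self (gaps : List (Int × Int)) (i : Nat) (a : Int × Int) (h : i < gaps.length) :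
    (gaps.set i a).drop i = a :: gaps.drop (i + 1) := by
  rw [List.drop_eq_getElem_cons (by simpa using h)]
  simp [List.getElem_set_self, List.drop_set]

theorem pvFitLoopA_eq (fs : List Int) (gaps : List (Int × Int)) (idx : Nat) (res : List (Int × Int)) :
    pvFitLoopA fs gaps idx res = pvFitLoopA' fs (gaps.drop idx) res := by
  induction fs generalizing gaps idx res with
  | nil => rfl
  | cons f fs ih =>
    simp only [pvFitLoopA, pvFitLoopA']
    have hd := pvSkipIdxA_drop gaps f idx
    by_cases h : pvSkipIdxA gaps f idx < gaps.length
    · simp only [h, dif_pos]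
      rw [← hd, List.drop_eq_getElem_cons h]
      rw [ih]
      congr 1
      rw [pvDrop_set_self _ _ _ h]
    · simp only [h, dif_neg, not_false_iff]
      rw [← hd, List.drop_of_length_le (by omega)]

-- B's on-demand gap search computes the skip over A's materialized gap list
theorem pvSkipGapsB_eq (f : Int) (taken : List (Int × Int)) (left rb : Int) :
    (match pvSkipGapsB f taken left rb with
     | some (g, taken', left') => pvSkipSmall f (pvGapsOf taken left rb) = g :: pvGapsOf taken' left' rb
     | none => pvSkipSmall f (pvGapsOf taken left rb) = []) := by
  induction taken generalizing left with
  | nil =>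
    simp only [pvSkipGapsB, pvGapsOf]
    by_cases h1 : left ≤ rb
    · by_cases h2 : rb - left + 1 ≥ f
      · rw [if_pos ⟨h1, h2⟩]
        simp only [if_pos h1, pvSkipSmall]
        rw [if_neg (by omega)]
        rw [pvGapsOf, if_neg (by omega)]
      · have hlt : rb - left + 1 < f := by omega
        rw [if_neg (by tauto)]
        simp only [if_pos h1]
        simp [pvSkipSmall, hlt]
    · rw [if_neg (by tauto)]
      simp only [if_neg h1, pvSkipSmall]
  | cons hd tl ih =>
    obtain ⟨l, r⟩ := hd
    simp only [pvSkipGapsB, pvGapsOf]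
    by_cases h1 : left > rb
    · rw [if_pos h1, if_pos h1, pvSkipSmall]
    · rw [if_neg h1, if_neg h1]
      by_cases h2 : left < l
      · by_cases h3 : l - left ≥ f
        · rw [if_pos ⟨h2, h3⟩]
          simp only [if_pos h2, List.cons_append, List.nil_append, pvSkipSmall]
          rw [if_neg (by omega)]
        · rw [if_neg (by tauto)]
          simp only [if_pos h2, List.cons_append, List.nil_append, pvSkipSmall]
          rw [if_pos (by omega)]
          exact ih (r + 1)
      · rw [if_neg (by tauto)]
        simp only [if_neg h2, List.nil_append]
        exact ih (r + 1)

-- correspondence of loop states: B's (cur, taken, left) represents the gap suffix A still sees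
theorem pvFitLoopB_eq (fs : List Int) (cur : Option (Int × Int)) (taken : List (Int × Int))
    (left rb : Int) (res : List (Int × Int)) :
    pvFitLoopB fs cur taken left rb res
      = pvFitLoopA' fs (cur.toList ++ pvGapsOf taken left rb) res := by
  induction fs generalizing cur taken left res with
  | nil => cases cur <;> rfl
  | cons f fs ih =>
    have hskip := pvSkipGapsB_eq f taken left rb
    cases cur with
    | some g =>
      simp only [pvFitLoopB, pvFitLoopA', Option.toList, List.cons_append, List.nil_append]
      by_cases hcap : g.2 - g.1 + 1 ≥ f
      · rw [if_pos hcap]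
        simp only [pvSkipSmall, if_neg (by omega : ¬ (g.2 - g.1 + 1 < f))]
        rw [ih]
        simp [Option.toList]
      · rw [if_neg hcap]
        simp only [pvSkipSmall, if_pos (by omega : g.2 - g.1 + 1 < f)]
        cases h : pvSkipGapsB f taken left rb with
        | none => rw [h] at hskip; rw [hskip]
        | some x =>
          obtain ⟨g', taken', left'⟩ := x
          rw [h] at hskip; rw [hskip]
          simp only [ih]
          simp [Option.toList]
    | none =>
      simp only [pvFitLoopB, pvFitLoopA', Option.toList, List.nil_append]
      cases h : pvSkipGapsB f taken left rb with
      | none => rw [h] at hskip; rw [hskip]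
      | some x =>
        obtain ⟨g', taken', left'⟩ := x
        rw [h] at hskip; rw [hskip]
        simp only [ih]
        simp [Option.toList]

-- ===== VERDICT (by name: the statement is the Claim_ definition above) =====
theorem fit_perm_spec : Claim_equal_fit_perm := by
  intro to_fit taken lb rb _
  show fit_perm to_fit taken lb rb = fit_perm_alt to_fit taken lb rb
  unfold fit_perm fit_perm_alt
  rw [pvBuildGapsA_eq, List.nil_append, pvFitLoopA_eq, List.drop_zero,
    pvFitLoopB_eq]
  rfl
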